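-- pv_equiv track=rewrite | github.com/karlmile/bioinf | zad5.1.py | moev
-- ===== SOURCE A (Python) =====
-- ak='ARNDCQEGHILKMFPSTWYV'
--
-- def moev(str,mo,indeks):
--     topsc=-1000 ## top score
--     topst=[] ## top string
--     topp=0 ## top position
--     m=len(mo) ## model length
--     n=len(str) ## string length
--     for i in range(n-m+1):
--         tmpsc=0
--         for j in range(m):
--             a=str[i+j]
--             b=ak.index(a)
--             tmpsc=tmpsc+mo[j][b]
--         if tmpsc>topsc:
--             topsc=tmpsc
--             topp=i
--
--     if topsc>-1000:
--         for i in range(m):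
--             topst.append(str[topp+i])
--     return topsc, topp, topst, indeks
-- ===== SOURCE B (Python) =====
-- ak='ARNDCQEGHILKMFPSTWYV'
--
-- def moev(str, mo, indeks):
--     m = len(mo)
--     n = len(str)
--     w = max(n - m + 1, 0)
--     scores = [0] * w
--     for j in range(m):
--         row = mo[j]
--         for i in range(w):
--             scores[i] += row[ak.index(str[i + j])]
--     topsc = -1000
--     topp = 0
--     for i in range(w):
--         if scores[i] > topsc:
--             topsc = scores[i]
--             topp = i
--     topst = [str[topp + k] for k in range(m)] if topsc > -1000 else []
--     return topsc, topp, topst, indeks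
-- ===== Notes on version B (the rewrite author's own statement) =====
-- stated objective: alternative
-- what changed: B replaces A's window-major nested scoring loop by a column-major accumulation into a precomputed scores array (one pass per profile row) followed by a single separate first-argmax scan, instead of interleaving scoring and maximum tracking per window.
import Mathlib
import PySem

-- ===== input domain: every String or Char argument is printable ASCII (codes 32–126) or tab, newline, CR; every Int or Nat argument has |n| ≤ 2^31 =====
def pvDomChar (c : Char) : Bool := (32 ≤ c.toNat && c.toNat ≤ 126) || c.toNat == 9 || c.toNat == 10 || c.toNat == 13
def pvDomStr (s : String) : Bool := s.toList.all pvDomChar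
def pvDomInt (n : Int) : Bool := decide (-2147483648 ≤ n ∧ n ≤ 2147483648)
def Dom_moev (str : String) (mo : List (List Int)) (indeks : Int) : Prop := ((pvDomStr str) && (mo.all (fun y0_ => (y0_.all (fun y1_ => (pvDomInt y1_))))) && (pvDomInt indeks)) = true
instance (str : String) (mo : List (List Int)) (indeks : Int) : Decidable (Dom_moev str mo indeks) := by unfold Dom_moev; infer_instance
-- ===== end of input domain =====

-- B replaces A's window-major scoring loop by column-major accumulation into a scores
-- array plus a separate first-argmax scan (objective: alternative decomposition, same cost).


-- the alphabet constant ak, shared by both sources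
def akChars : List Char := "ARNDCQEGHILKMFPSTWYV".toList

-- ===== PORT A =====
def moev (str : String) (mo : List (List Int)) (indeks : Int) : Int × Int × List String × Int :=
  let m : Int := (mo.length : Int)
  let n : Int := ((str.toList.length : Nat) : Int)
  let res := (PySem.List.pyRange 0 (n - m + 1) 1).foldl (fun (p : Int × Int) i =>
      let tmpsc := (PySem.List.pyRange 0 m 1).foldl (fun t j =>
          let a := (PySem.Str.pyGet? str (i + j)).getD 'A'
          let b := (PySem.List.index? akChars a).getD akChars.length
          t + PySem.List.pyGetD (PySem.List.pyGetD mo j []) ((b : Nat) : Int) 0) 0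
      if tmpsc > p.1 then (tmpsc, i) else p) (-1000, 0)
  let topst : List String := if res.1 > -1000 then
      (PySem.List.pyRange 0 m 1).map (fun k =>
        String.ofList [(PySem.Str.pyGet? str (res.2 + k)).getD 'A'])
    else []
  (res.1, res.2, topst, indeks)

-- ===== PORT B =====
def moev_alt (str : String) (mo : List (List Int)) (indeks : Int) : Int × Int × List String × Int :=
  let cs := str.toList
  let m := mo.length
  let w := cs.length + 1 - m
  let scores := (List.range m).foldl (fun (sc : List Int) j =>
      let row := mo.getD j []
      sc.mapIdx (fun i s =>
        s + row.getD ((PySem.List.index? akChars (cs.getD (i + j) 'A')).getD akChars.length) 0))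
    (List.replicate w 0)
  let best := (List.range w).foldl (fun (p : Int × Nat) i =>
      if scores.getD i 0 > p.1 then (scores.getD i 0, i) else p) (-1000, 0)
  let topst : List String := if best.1 > -1000 then
      (List.range m).map (fun k => String.ofList [cs.getD (best.2 + k) 'A'])
    else []
  (best.1, (best.2 : Int), topst, indeks)

-- ===== PRECONDITION & SPEC =====
-- Pre_ admits exactly the inputs where every lookup A performs succeeds: for every
-- window position i and profile row j, the character str[i+j] occurs in ak and its
-- alphabet index is a valid column of row j (otherwise Python A raises ValueError/IndexError).
def Pre_moev (str : String) (mo : List (List Int)) (indeks : Int) : Prop :=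
  ∀ j, j < mo.length → ∀ i, i < str.toList.length + 1 - mo.length →
    (str.toList.getD (i + j) 'A') ∈ akChars ∧
    akChars.idxOf (str.toList.getD (i + j) 'A') < (mo.getD j []).length
instance (str : String) (mo : List (List Int)) (indeks : Int) : Decidable (Pre_moev str mo indeks) := by unfold Pre_moev; infer_instance

def pvWitness_moev : String × List (List Int) × Int := ("AA", [[3, 1], [2, 5]], 7)

def Spec_moev (str : String) (mo : List (List Int)) (indeks : Int) (out : Int × Int × List String × Int) : Prop := out = moev_alt str mo indeks
instance (str : String) (mo : List (List Int)) (indeks : Int) (out : Int × Int × List String × Int) : Decidable (Spec_moev str mo indeks out) := by unfold Spec_moev; infer_instance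

-- ===== CLAIM (what is proved, stated in full; the proofs are below) =====
def Claim_equal_moev : Prop := ∀ (str : String) (mo : List (List Int)) (indeks : Int), Dom_moev str mo indeks → Pre_moev str mo indeks → Spec_moev str mo indeks (moev str mo indeks)

-- ===== LEMMAS AND PROOFS =====

-- the score one profile cell contributes, on the Nat side
def pvCell (cs : List Char) (mo : List (List Int)) (i j : Nat) : Int :=
  (mo.getD j []).getD ((PySem.List.index? akChars (cs.getD (i + j) 'A')).getD akChars.length) 0

-- total score of the window starting at i
def pvScore (cs : List Char) (mo : List (List Int)) (i : Nat) : Int :=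
  ((List.range mo.length).map (fun j => pvCell cs mo i j)).sum

theorem pv_mapIdx_map_range {w : Nat} (g : Nat → Int) (h : Nat → Int → Int) :
    ((List.range w).map g).mapIdx (fun i s => h i s) = (List.range w).map (fun i => h i (g i)) := by
  apply List.ext_getElem <;> simp

theorem pv_scores_eq (t : Nat → Nat → Int) (J : List Nat) :
    ∀ (w : Nat) (g : Nat → Int),
    J.foldl (fun (sc : List Int) j => sc.mapIdx (fun i s => s + t i j)) ((List.range w).map g)
      = (List.range w).map (fun i => g i + (J.map (fun j => t i j)).sum) := by
  induction J with
  | nil => intro w g; simp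
  | cons j J ih =>
      intro w g
      simp only [List.foldl_cons]
      rw [pv_mapIdx_map_range g (fun i s => s + t i j), ih w (fun i => g i + t i j)]
      apply List.map_congr_left
      intro i _
      simp [add_assoc]

theorem pv_scan_eq (f : Nat → Int) (J : List Nat) :
    ∀ (ts : Int) (tp : Nat),
    J.foldl (fun (p : Int × Int) (k : Nat) => if f k > p.1 then (f k, (k : Int)) else p) (ts, (tp : Int))
      = (fun q : Int × Nat => (q.1, (q.2 : Int)))
          (J.foldl (fun (p : Int × Nat) k => if f k > p.1 then (f k, k) else p) (ts, tp)) := by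
  induction J with
  | nil => intro ts tp; rfl
  | cons k J ih =>
      intro ts tp
      simp only [List.foldl_cons]
      by_cases h : f k > ts
      · simp only [h, if_pos]; exact ih (f k) k
      · simp only [h, if_neg, not_false_iff]; exact ih ts tp

theorem pv_ports_eq (str : String) (mo : List (List Int)) (indeks : Int) :
    moev str mo indeks = moev_alt str mo indeks := by
  simp only [moev, moev_alt]
  have hR1 : PySem.List.pyRange 0 ((str.toList.length : Int) - (mo.length : Int) + 1) 1
      = (List.range (str.toList.length + 1 - mo.length)).map (fun k : Nat => (k : Int)) := by
    rw [PySem.List.pyRange_one]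
    have h : ((str.toList.length : Int) - (mo.length : Int) + 1 - 0).toNat
        = str.toList.length + 1 - mo.length := by omega
    rw [h]; simp
  have hR2 : PySem.List.pyRange 0 ((mo.length : Nat) : Int) 1
      = (List.range mo.length).map (fun k : Nat => (k : Int)) := by
    rw [PySem.List.pyRange_one]; simp
  have htmp : ∀ k : Nat,
      ((List.range mo.length).map (fun j : Nat => (j : Int))).foldl (fun t j =>
          t + PySem.List.pyGetD (PySem.List.pyGetD mo j [])
              (((PySem.List.index? akChars ((PySem.Str.pyGet? str ((k : Int) + j)).getD 'A')).getD akChars.length : Nat) : Int) 0) 0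
        = pvScore str.toList mo k := by
    intro k
    rw [List.foldl_map, PySem.List.foldl_add, pvScore, zero_add]
    apply congrArg
    apply List.map_congr_left
    intro j _
    have hidx : ((k : Int) + (j : Int)) = ((k + j : Nat) : Int) := by push_cast; ring
    simp [pvCell, PySem.List.pyGetD_natCast, List.getD_eq_getElem?_getD]
    rw [hidx, PySem.List.pyGet?_natCast]
  have hscores : (List.range mo.length).foldl (fun (sc : List Int) j =>
        sc.mapIdx (fun i s =>
          s + (mo.getD j []).getD ((PySem.List.index? akChars (str.toList.getD (i + j) 'A')).getD akChars.length) 0))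
        (List.replicate (str.toList.length + 1 - mo.length) 0)
      = (List.range (str.toList.length + 1 - mo.length)).map (fun i => pvScore str.toList mo i) := by
    have hrep : (List.replicate (str.toList.length + 1 - mo.length) (0 : Int))
        = (List.range (str.toList.length + 1 - mo.length)).map (fun _ => (0 : Int)) := by
      simp [List.map_const']
    rw [hrep, pv_scores_eq (fun i j =>
      (mo.getD j []).getD ((PySem.List.index? akChars (str.toList.getD (i + j) 'A')).getD akChars.length) 0)]
    apply List.map_congr_left
    intro i _
    simp [pvScore, pvCell]
  rw [hR1, hR2, List.foldl_map]
  simp only [htmp]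
  rw [hscores]
  have hscan : (List.range (str.toList.length + 1 - mo.length)).foldl
        (fun (p : Int × Nat) i =>
          if ((List.range (str.toList.length + 1 - mo.length)).map (fun i => pvScore str.toList mo i)).getD i 0 > p.1
          then (((List.range (str.toList.length + 1 - mo.length)).map (fun i => pvScore str.toList mo i)).getD i 0, i) else p)
        (-1000, 0)
      = (List.range (str.toList.length + 1 - mo.length)).foldl
        (fun (p : Int × Nat) i => if pvScore str.toList mo i > p.1 then (pvScore str.toList mo i, i) else p)
        (-1000, 0) := by
    apply PySem.List.foldl_congr_mem
    intro acc x hx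
    have hxlt : x < str.toList.length + 1 - mo.length := List.mem_range.mp hx
    rw [PySem.List.getD_map_range (fun i => pvScore str.toList mo i) _ _ _ hxlt]
  rw [hscan]
  have hs := pv_scan_eq (fun k => pvScore str.toList mo k) (List.range (str.toList.length + 1 - mo.length)) (-1000) 0
  simp only [Nat.cast_zero] at hs
  rw [hs]
  dsimp only
  simp only [Prod.mk.injEq, true_and, and_true]
  split_ifs with hb
  · rw [List.map_map]
    apply List.map_congr_left
    intro k _
    have hidx : (((((List.range (str.toList.length + 1 - mo.length)).foldl
        (fun (p : Int × Nat) i => if pvScore str.toList mo i > p.1 then (pvScore str.toList mo i, i) else p)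
        (-1000, 0)).2 : Nat) : Int) + (k : Int))
        = ((((List.range (str.toList.length + 1 - mo.length)).foldl
        (fun (p : Int × Nat) i => if pvScore str.toList mo i > p.1 then (pvScore str.toList mo i, i) else p)
        (-1000, 0)).2 + k : Nat) : Int) := by push_cast; ring
    simp only [Function.comp]
    rw [hidx, PySem.Str.pyGet?_natCast]
    simp [List.getD_eq_getElem?_getD]
  · rfl
-- ===== VERDICT (by name: the statement is the Claim_ definition above) =====
theorem moev_spec : Claim_equal_moev := by
  intro str mo indeks _ _
  exact pv_ports_eq str mo indeks
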